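-- pv_equiv track=rewrite | github.com/nguyentran6698/LC_Practice | contest/weekly/weekly318/2.py | solution
-- ===== SOURCE A (Python) =====
-- from collections import defaultdict
--
-- def solution(nums,k):
--     curMax = 0
--     start =  0
--     maxVal = 0
--     d = defaultdict(int)
--     for end in range(len(nums)):
--         curMax += nums[end]
--         d[nums[end]] += 1
--         while d[nums[end]] > 1:
--             curMax -= nums[start]
--             d[nums[start]] -= 1
--             start += 1
--         if end - start + 1>= k:
--             maxVal = max(maxVal,curMax)
--             curMax -= nums[start]
--             d[nums[start]] -= 1
--             start += 1
--     return maxVal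
-- ===== SOURCE B (Python) =====
-- def solution(nums, k):
--     n = len(nums)
--     if k < 1 or k > n:
--         return 0
--     maxVal = 0
--     for i in range(n - k + 1):
--         window = nums[i:i + k]
--         if len(set(window)) == k:
--             maxVal = max(maxVal, sum(window))
--     return maxVal
-- ===== Notes on version B (the rewrite author's own statement) =====
-- stated objective: simpler
-- what changed: Replaced the amortized sliding-window with frequency dict and forced post-record slide by a direct scan over all k-length windows, testing distinctness with a set and summing each window.
-- intended difference: For k <= 0 (with some positive element) A's leftover slide logic degenerates into returning the maximum positive element, while B returns 0 because no k-length subarray exists, which is the intended answer for a degenerate window size. — e.g. on solution([1], 0): A returns 1, B returns 0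
import Mathlib
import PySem

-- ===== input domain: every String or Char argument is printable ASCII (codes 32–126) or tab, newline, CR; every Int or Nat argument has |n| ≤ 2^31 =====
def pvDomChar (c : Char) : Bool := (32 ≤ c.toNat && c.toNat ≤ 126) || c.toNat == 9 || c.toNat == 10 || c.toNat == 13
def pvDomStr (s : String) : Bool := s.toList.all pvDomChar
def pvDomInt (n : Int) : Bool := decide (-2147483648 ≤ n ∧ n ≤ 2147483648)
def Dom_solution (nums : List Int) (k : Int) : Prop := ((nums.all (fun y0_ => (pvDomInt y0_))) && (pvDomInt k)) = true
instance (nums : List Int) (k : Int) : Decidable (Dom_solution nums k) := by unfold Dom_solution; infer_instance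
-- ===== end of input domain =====

-- B replaces A's amortized sliding window (frequency dict + forced slide) by a direct scan of all
-- k-length windows with a set-based distinctness test: simpler, not faster (return value only).

-- ===== PORT A =====
-- the inner 'while d[nums[end]] > 1' loop; 'fuel' (passed as nums.length - start, an upper bound
-- on the possible iterations) is only a totality guard — on the states solution reaches the loop
-- always exits by its own condition before fuel runs out
def pvWhileA (nums : List Int) (x : Int) (fuel : Nat) (curMax : Int) (start : Nat)
    (d : PySem.Dict Int Int) : Int × Nat × PySem.Dict Int Int :=
  match fuel with
  | 0 => (curMax, start, d)
  | fuel + 1 =>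
    if 1 < d.getD x 0 then
      pvWhileA nums x fuel (curMax - nums.getD start 0) (start + 1)
        (d.insert (nums.getD start 0) (d.getD (nums.getD start 0) 0 - 1))
    else (curMax, start, d)

-- one iteration of A's 'for end in range(len(nums))' loop; state (curMax, start, maxVal, d)
def pvStepA (nums : List Int) (k : Int) (st : Int × Nat × Int × PySem.Dict Int Int) (e : Nat) :
    Int × Nat × Int × PySem.Dict Int Int :=
  let x := nums.getD e 0
  let curMax := st.1 + x
  let d := st.2.2.2.insert x (st.2.2.2.getD x 0 + 1)
  match pvWhileA nums x (nums.length - st.2.1) curMax st.2.1 d with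
  | (curMax, start, d) =>
    if k ≤ (e : Int) - (start : Int) + 1 then
      let y := nums.getD start 0
      (curMax - y, start + 1, max st.2.2.1 curMax, d.insert y (d.getD y 0 - 1))
    else (curMax, start, st.2.2.1, d)

def solution (nums : List Int) (k : Int) : Int :=
  ((List.range nums.length).foldl (pvStepA nums k) (0, 0, 0, PySem.Dict.empty)).2.2.1

-- ===== PORT B =====
-- body of B's 'for i in range(n - k + 1)' loop (kN = k as a Nat, valid under the guard)
def pvBodyB (nums : List Int) (kN : Nat) (maxVal : Int) (i : Nat) : Int :=
  let window := (nums.drop i).take kN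
  if (PySem.Set.ofList window).length = kN then max maxVal window.sum else maxVal

def solution_alt (nums : List Int) (k : Int) : Int :=
  if k < 1 ∨ (nums.length : Int) < k then 0
  else (List.range (nums.length - k.toNat + 1)).foldl (pvBodyB nums k.toNat) 0

-- ===== PRECONDITION & SPEC =====
-- For k <= 0 with some positive element, A's forced post-record slide degenerates into returning the
-- maximum positive element; B returns 0 since no k-length subarray exists — the intended answer.
def D_solution (nums : List Int) (k : Int) : Prop := k ≤ 0 ∧ ∃ x ∈ nums, 0 < x
instance (nums : List Int) (k : Int) : Decidable (D_solution nums k) := by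
  unfold D_solution; infer_instance

def Spec_solution (nums : List Int) (k : Int) (out : Int) : Prop :=
  ¬ D_solution nums k → out = solution_alt nums k
instance (nums : List Int) (k : Int) (out : Int) : Decidable (Spec_solution nums k out) := by
  unfold Spec_solution; infer_instance

def pvDiffWitness_solution : List Int × Int := ([1], 0)
def pvDiffWitnessOut_solution : Int × Int := (1, 0)

-- ===== CLAIM (what is proved, stated in full; the proofs are below) =====
def Claim_unchanged_solution : Prop := ∀ (nums : List Int) (k : Int), Dom_solution nums k → Spec_solution nums k (solution nums k)
def Claim_changed_solution : Prop := Dom_solution (pvDiffWitness_solution.1) (pvDiffWitness_solution.2) ∧ D_solution (pvDiffWitness_solution.1) (pvDiffWitness_solution.2) ∧ solution (pvDiffWitness_solution.1) (pvDiffWitness_solution.2) = pvDiffWitnessOut_solution.1 ∧ solution_alt (pvDiffWitness_solution.1) (pvDiffWitness_solution.2) = pvDiffWitnessOut_solution.2 ∧ pvDiffWitnessOut_solution.1 ≠ pvDiffWitnessOut_solution.2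
def Claim_exact_solution : Prop := ∀ (nums : List Int) (k : Int), Dom_solution nums k → D_solution nums k → solution nums k ≠ solution_alt nums k

-- ===== LEMMAS AND PROOFS =====

-- the window nums[s:e]
def pvWin (nums : List Int) (s e : Nat) : List Int := (nums.drop s).take (e - s)

lemma pvWin_snoc (nums : List Int) (s e : Nat) (hse : s ≤ e) (he : e < nums.length) :
    pvWin nums s (e + 1) = pvWin nums s e ++ [nums.getD e 0] := by
  have h1 : e + 1 - s = (e - s) + 1 := by omega
  rw [pvWin, pvWin, h1, List.take_succ]
  have h2 : (nums.drop s)[e - s]? = nums[e]? := by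
    rw [List.getElem?_drop]; congr 1; omega
  rw [h2, List.getElem?_eq_getElem he]
  simp [List.getD_eq_getElem?_getD, List.getElem?_eq_getElem he]

lemma pvWin_cons (nums : List Int) (s e : Nat) (hse : s < e) (he : e ≤ nums.length) :
    pvWin nums s e = nums.getD s 0 :: pvWin nums (s + 1) e := by
  have hs : s < nums.length := lt_of_lt_of_le hse he
  have h1 : e - s = (e - (s + 1)) + 1 := by omega
  rw [pvWin, List.drop_eq_getElem_cons hs, h1, List.take_succ_cons, pvWin]
  simp [List.getD_eq_getElem?_getD, List.getElem?_eq_getElem hs]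

lemma pvWin_length (nums : List Int) (s e : Nat) (hse : s ≤ e) (he : e ≤ nums.length) :
    (pvWin nums s e).length = e - s := by
  simp [pvWin]; omega

-- B's partial result over windows ending before index e
def pvB (nums : List Int) (kN e : Nat) : Int :=
  (List.range (e + 1 - kN)).foldl (pvBodyB nums kN) 0

-- PySem.Set.ofList keeps a sublist of its argument (first occurrences)
lemma pvFoldlAdd_sublist {α : Type} [BEq α] (xs : List α) :
    ∀ s : PySem.Set α, (xs.foldl PySem.Set.add s).Sublist (s ++ xs) := by
  induction xs with
  | nil => intro s; simp
  | cons x xs ih =>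
    intro s
    have h := ih (PySem.Set.add s x)
    rw [List.foldl_cons]
    refine h.trans ?_
    rw [PySem.Set.add]
    split
    · exact (List.append_sublist_append_left s).mpr (List.sublist_cons_self x xs)
    · rw [List.append_assoc, List.singleton_append]

lemma pvOfList_sublist {α : Type} [BEq α] (xs : List α) :
    (PySem.Set.ofList xs).Sublist xs := by
  have h := pvFoldlAdd_sublist xs ([] : PySem.Set α)
  simpa [PySem.Set.ofList_eq_foldl] using h

lemma pvOfList_length_eq_iff (xs : List Int) :
    (PySem.Set.ofList xs).length = xs.length ↔ xs.Nodup := by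
  constructor
  · intro h
    have := (pvOfList_sublist xs).eq_of_length h
    rw [← this]; exact PySem.Set.nodup_ofList xs
  · intro h; rw [PySem.Set.ofList_eq_self_of_nodup xs h]

-- the invariant carried through A's for-loop (k ≥ 1 case)
def pvInv (nums : List Int) (kN e : Nat) (st : Int × Nat × Int × PySem.Dict Int Int) : Prop :=
  st.2.1 ≤ e ∧ e < st.2.1 + kN ∧ (pvWin nums st.2.1 e).Nodup ∧
  st.1 = (pvWin nums st.2.1 e).sum ∧
  (∀ y, st.2.2.2.getD y 0 = ((pvWin nums st.2.1 e).count y : Int)) ∧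
  (∀ j, j < st.2.1 → j + kN ≤ e ∨ ¬ (pvWin nums j e).Nodup) ∧
  st.2.2.1 = pvB nums kN e

-- decrementing the departing element's count turns window-[s,e) counts into window-[s+1,e) counts
lemma pvCnt_shift (nums : List Int) (s e : Nat) (hse : s < e) (he : e ≤ nums.length)
    (d : PySem.Dict Int Int) (hcnt : ∀ y, d.getD y 0 = ((pvWin nums s e).count y : Int)) :
    ∀ y, (d.insert (nums.getD s 0) (d.getD (nums.getD s 0) 0 - 1)).getD y 0 =
      ((pvWin nums (s + 1) e).count y : Int) := by
  intro y
  have hcons := pvWin_cons nums s e hse he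
  rw [PySem.Dict.getD_insert]
  by_cases hy : y = nums.getD s 0
  · subst hy
    rw [if_pos rfl, hcnt, hcons, List.count_cons]
    simp
  · rw [if_neg hy, hcnt, hcons, List.count_cons]
    have hbe : (nums.getD s 0 == y) = false := beq_eq_false_iff_ne.mpr (Ne.symm hy)
    rw [hbe]
    simp

-- a non-distinct window stays non-distinct when extended on the right
lemma pvLift (nums : List Int) (j e : Nat) (hj : j ≤ e) (he : e < nums.length)
    (h : ¬ (pvWin nums j e).Nodup) : ¬ (pvWin nums j (e + 1)).Nodup := by
  intro h1
  apply h
  apply List.Nodup.sublist _ h1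
  rw [pvWin_snoc nums j e hj he]
  exact List.sublist_append_left _ _

-- specification of the inner while loop
lemma pvWhileA_spec (nums : List Int) (e : Nat) (he : e < nums.length) :
    ∀ fuel s, s ≤ e → e < s + fuel → (pvWin nums s e).Nodup →
    ∀ curMax d, curMax = (pvWin nums s (e + 1)).sum →
      (∀ y, d.getD y 0 = ((pvWin nums s (e + 1)).count y : Int)) →
      ∃ s2 d2, pvWhileA nums (nums.getD e 0) fuel curMax s d =
          ((pvWin nums s2 (e + 1)).sum, s2, d2) ∧
        s ≤ s2 ∧ s2 ≤ e ∧ (pvWin nums s2 (e + 1)).Nodup ∧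
        (∀ y, d2.getD y 0 = ((pvWin nums s2 (e + 1)).count y : Int)) ∧
        (∀ j, s ≤ j → j < s2 → ¬ (pvWin nums j (e + 1)).Nodup) := by
  intro fuel
  induction fuel with
  | zero => intro s hse hf; omega
  | succ fuel ih =>
    intro s hse hf hnd curMax d hsum hcnt
    have hx := pvWin_snoc nums s e hse he
    set x := nums.getD e 0 with hxdef
    have hcx : d.getD x 0 = ((pvWin nums s e).count x : Int) + 1 := by
      rw [hcnt x, hx]; simp
    by_cases hmem : x ∈ pvWin nums s e
    · -- duplicate: loop body runs
      have hcpos : 0 < (pvWin nums s e).count x := List.count_pos_iff.mpr hmem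
      have hcond : (1 : Int) < d.getD x 0 := by rw [hcx]; omega
      have hslt : s < e := by
        by_contra h
        have : s = e := by omega
        subst this
        simp [pvWin] at hmem
      have hconsE : pvWin nums s e = nums.getD s 0 :: pvWin nums (s + 1) e :=
        pvWin_cons nums s e hslt (le_of_lt he)
      have hconsE1 : pvWin nums s (e + 1) = nums.getD s 0 :: pvWin nums (s + 1) (e + 1) :=
        pvWin_cons nums s (e + 1) (by omega) (by omega)
      have hnd' : (pvWin nums (s + 1) e).Nodup := by
        rw [hconsE] at hnd; exact hnd.of_cons
      have hsum' : curMax - nums.getD s 0 = (pvWin nums (s + 1) (e + 1)).sum := by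
        rw [hsum, hconsE1]; simp
      have hcnt' := pvCnt_shift nums s (e + 1) (by omega) (by omega) d hcnt
      obtain ⟨s2, d2, heq, h1, h2, h3, h4, h5⟩ :=
        ih (s + 1) (by omega) (by omega) hnd' (curMax - nums.getD s 0) _ hsum' hcnt'
      refine ⟨s2, d2, ?_, by omega, h2, h3, h4, ?_⟩
      · rw [pvWhileA, if_pos hcond]; exact heq
      · intro j hj1 hj2
        rcases Nat.eq_or_lt_of_le hj1 with hj | hj
        · subst hj
          rw [List.nodup_iff_count_le_one]
          push_neg
          refine ⟨x, ?_⟩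
          rw [hx]; simp; omega
        · exact h5 j hj hj2
    · -- new element distinct: loop exits
      have hc0 : (pvWin nums s e).count x = 0 := List.count_eq_zero.mpr hmem
      have hcond : ¬ (1 : Int) < d.getD x 0 := by rw [hcx, hc0]; omega
      refine ⟨s, d, ?_, le_rfl, hse, ?_, hcnt, by omega⟩
      · rw [pvWhileA, if_neg hcond, hsum]
      · rw [hx]
        simp [List.nodup_append, hnd]
        exact fun a ha h => hmem (h ▸ ha)

lemma pvB_succ (nums : List Int) (kN e : Nat) (hke : kN ≤ e + 1) :
    pvB nums kN (e + 1) = pvBodyB nums kN (pvB nums kN e) (e + 1 - kN) := by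
  rw [pvB, pvB]
  have hrange : e + 1 + 1 - kN = (e + 1 - kN) + 1 := by omega
  rw [hrange, List.range_succ, List.foldl_append, List.foldl_cons, List.foldl_nil]

lemma pvB_succ_short (nums : List Int) (kN e : Nat) (hke : e + 1 < kN) :
    pvB nums kN (e + 1) = pvB nums kN e := by
  rw [pvB, pvB]
  have h : e + 1 + 1 - kN = e + 1 - kN := by omega
  rw [h]

lemma pvStepA_inv (nums : List Int) (k : Int) (hk : 1 ≤ k) (e : Nat) (he : e < nums.length)
    (st : Int × Nat × Int × PySem.Dict Int Int) (hst : pvInv nums k.toNat e st) :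
    pvInv nums k.toNat (e + 1) (pvStepA nums k st e) := by
  have hkk : ((k.toNat : Nat) : Int) = k := Int.toNat_of_nonneg (by omega)
  set kN := k.toNat with hkNdef
  have hk1 : 1 ≤ kN := by omega
  obtain ⟨curMax, s, maxVal, d⟩ := st
  obtain ⟨hs_le, hs_lt, hnd, hsum, hcnt, hmin, hmax⟩ := hst
  simp only at hs_le hs_lt hnd hsum hcnt hmin hmax
  set x := nums.getD e 0 with hxdef
  have hsnoc := pvWin_snoc nums s e hs_le he
  have hsum1 : curMax + x = (pvWin nums s (e + 1)).sum := by
    rw [hsnoc, List.sum_append, hsum, hxdef]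
    simp [List.getD_eq_getElem?_getD]
  have hcnt1 : ∀ y, (d.insert x (d.getD x 0 + 1)).getD y 0 =
      ((pvWin nums s (e + 1)).count y : Int) := by
    intro y
    rw [PySem.Dict.getD_insert, hsnoc, List.count_append]
    by_cases hy : y = x
    · subst hy
      rw [if_pos rfl, hcnt, hxdef]
      simp [List.getD_eq_getElem?_getD]
    · rw [if_neg hy, hcnt]
      have h0 : List.count y [nums.getD e 0] = 0 := by
        apply List.count_eq_zero.mpr
        simp only [List.mem_singleton]
        rw [← hxdef]
        exact fun h => hy h
      rw [h0]
      simp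
  obtain ⟨s2, d2, heq, hss2, hs2e, hnd2, hcnt2, hmin2⟩ :=
    pvWhileA_spec nums e he (nums.length - s) s hs_le (by omega) hnd (curMax + x) _ hsum1 hcnt1
  rw [pvStepA]
  simp only
  rw [heq]
  by_cases hfire : k ≤ (e : Int) - (s2 : Int) + 1
  · -- the window reached length k: record and slide
    have hfire' : s2 + kN ≤ e + 1 := by rw [← hkk] at hfire; omega
    have hi : s2 = e + 1 - kN := by omega
    have hke : kN ≤ e + 1 := by omega
    rw [if_pos hfire]
    have hconsS2 : pvWin nums s2 (e + 1) = nums.getD s2 0 :: pvWin nums (s2 + 1) (e + 1) :=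
      pvWin_cons nums s2 (e + 1) (by omega) (by omega)
    simp only [pvInv]
    refine ⟨by omega, by omega, ?_, ?_, ?_, ?_, ?_⟩
    · rw [hconsS2] at hnd2
      exact hnd2.of_cons
    · rw [hconsS2, List.sum_cons]
      ring
    · exact pvCnt_shift nums s2 (e + 1) (by omega) (by omega) d2 hcnt2
    · intro j hj
      by_cases hjs : j < s
      · rcases hmin j hjs with h | h
        · exact Or.inl (by omega)
        · exact Or.inr (pvLift nums j e (by omega) he h)
      · by_cases hjs2 : j < s2
        · exact Or.inr (hmin2 j (by omega) hjs2)
        · have hj2 : j = s2 := by omega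
          exact Or.inl (by omega)
    · rw [pvB_succ nums kN e hke, pvBodyB]
      have hwin : (nums.drop (e + 1 - kN)).take kN = pvWin nums s2 (e + 1) := by
        rw [pvWin, ← hi]
        congr 1
        omega
      rw [hwin, PySem.Set.ofList_eq_self_of_nodup _ hnd2,
        pvWin_length nums s2 (e + 1) (by omega) (by omega), if_pos (by omega), hmax]
  · -- window still shorter than k
    have hfire' : e + 1 < s2 + kN := by rw [← hkk] at hfire; omega
    rw [if_neg hfire]
    simp only [pvInv]
    refine ⟨by omega, by omega, hnd2, trivial, hcnt2, ?_, ?_⟩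
    · intro j hj
      by_cases hjs : j < s
      · rcases hmin j hjs with h | h
        · exact Or.inl (by omega)
        · exact Or.inr (pvLift nums j e (by omega) he h)
      · exact Or.inr (hmin2 j (by omega) hj)
    · rw [hmax]
      by_cases hke : kN ≤ e + 1
      · rw [pvB_succ nums kN e hke, pvBodyB]
        have hwin : (nums.drop (e + 1 - kN)).take kN = pvWin nums (e + 1 - kN) (e + 1) := by
          rw [pvWin]
          congr 1
          omega
        have hnodup : ¬ (pvWin nums (e + 1 - kN) (e + 1)).Nodup := by
          by_cases hjs : e + 1 - kN < s
          · rcases hmin (e + 1 - kN) hjs with h | h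
            · omega
            · exact pvLift nums (e + 1 - kN) e (by omega) he h
          · exact hmin2 (e + 1 - kN) (by omega) (by omega)
        rw [hwin, if_neg ?_]
        intro hlen
        apply hnodup
        have hl := pvWin_length nums (e + 1 - kN) (e + 1) (by omega) (by omega)
        rw [← pvOfList_length_eq_iff _, hlen, hl]
        omega
      · rw [pvB_succ_short nums kN e (by omega)]

lemma pvFold_inv (nums : List Int) (k : Int) (hk : 1 ≤ k) (m : Nat) (hm : m ≤ nums.length) :
    pvInv nums k.toNat m ((List.range m).foldl (pvStepA nums k) (0, 0, 0, PySem.Dict.empty)) := by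
  induction m with
  | zero =>
    simp only [List.range_zero, List.foldl_nil]
    refine ⟨le_rfl, by omega, by simp [pvWin], by simp [pvWin], ?_, ?_, ?_⟩
    · intro y; simp [pvWin, PySem.Dict.getD_empty]
    · intro j hj; simp only at hj; omega
    · have h1 : 1 - k.toNat = 0 := by omega
      simp [pvB, h1]
  | succ m ihm =>
    rw [List.range_succ, List.foldl_append, List.foldl_cons, List.foldl_nil]
    exact pvStepA_inv nums k hk m (by omega) _ (ihm (by omega))

-- A = B for k ≥ 1
lemma pvMain (nums : List Int) (k : Int) (hk : 1 ≤ k) :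
    solution nums k = solution_alt nums k := by
  have hfold := pvFold_inv nums k hk nums.length le_rfl
  have hkk : ((k.toNat : Nat) : Int) = k := Int.toNat_of_nonneg (by omega)
  rw [solution, hfold.2.2.2.2.2.2, solution_alt]
  by_cases hkn : (nums.length : Int) < k
  · rw [if_pos (Or.inr hkn), pvB]
    have h1 : nums.length + 1 - k.toNat = 0 := by omega
    rw [h1]
    simp
  · rw [if_neg (by rw [not_or]; constructor <;> omega), pvB]
    have h1 : nums.length + 1 - k.toNat = nums.length - k.toNat + 1 := by omega
    rw [h1]

-- for k ≤ 0 A's loop degenerates to the running max of the elements (initial 0)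
lemma pvDeg_fold (nums : List Int) (k : Int) (hk : k ≤ 0) :
    ∀ m, m ≤ nums.length → ∃ d,
      (List.range m).foldl (pvStepA nums k) (0, 0, 0, PySem.Dict.empty) =
        (0, m, (nums.take m).foldl (fun a x => max a x) 0, d) ∧
      ∀ y, d.getD y 0 = 0 := by
  intro m
  induction m with
  | zero =>
    intro _
    refine ⟨PySem.Dict.empty, by simp, fun y => PySem.Dict.getD_empty y 0⟩
  | succ m ih =>
    intro hm
    obtain ⟨d, hfold, hd0⟩ := ih (by omega)
    rw [List.range_succ, List.foldl_append, List.foldl_cons, List.foldl_nil, hfold, pvStepA]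
    simp only
    set x := nums.getD m 0 with hxdef
    have hfuel : nums.length - m = (nums.length - m - 1) + 1 := by omega
    have hg : (d.insert x (d.getD x 0 + 1)).getD x 0 = 1 := by
      rw [PySem.Dict.getD_insert_self, hd0]
      omega
    rw [hfuel, pvWhileA, hg, if_neg (show ¬ (1 : Int) < 1 by omega)]
    simp only
    rw [if_pos (show k ≤ (m : Int) - (m : Int) + 1 by omega)]
    refine ⟨(d.insert x (d.getD x 0 + 1)).insert x
        ((d.insert x (d.getD x 0 + 1)).getD x 0 - 1), ?_, ?_⟩
    · have hm' : m < nums.length := by omega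
      have htake : nums.take (m + 1) = nums.take m ++ [x] := by
        rw [List.take_succ, List.getElem?_eq_getElem hm', hxdef]
        simp [List.getD_eq_getElem?_getD, List.getElem?_eq_getElem hm']
      rw [htake, List.foldl_append, List.foldl_cons, List.foldl_nil]
      have h1 : (0 : Int) + x - x = 0 := by ring
      have h2 : (0 : Int) + x = x := by ring
      rw [h1, h2]
    · intro y
      rw [PySem.Dict.getD_insert]
      by_cases hy : y = x
      · subst hy
        rw [if_pos rfl, hg]
        omega
      · rw [if_neg hy, PySem.Dict.getD_insert, if_neg hy, hd0]

lemma pvDegenerate (nums : List Int) (k : Int) (hk : k ≤ 0) :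
    solution nums k = nums.foldl (fun a x => max a x) 0 := by
  obtain ⟨d, hfold, -⟩ := pvDeg_fold nums k hk nums.length le_rfl
  rw [solution, hfold]
  simp

lemma pvAlt_degenerate (nums : List Int) (k : Int) (hk : k ≤ 0) :
    solution_alt nums k = 0 := by
  rw [solution_alt, if_pos (Or.inl (by omega))]

lemma pvFoldlMax_nonpos (l : List Int) (h : ∀ x ∈ l, x ≤ 0) :
    l.foldl (fun a x => max a x) 0 = 0 := by
  induction l with
  | nil => rfl
  | cons x t ih =>
    rw [List.foldl_cons]
    have hx : max (0 : Int) x = 0 := max_eq_left (h x (by simp))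
    rw [hx]
    exact ih (fun y hy => h y (by simp [hy]))

-- ===== VERDICT (by name: the statement is the Claim_ definition above) =====
theorem solution_spec : Claim_unchanged_solution := by
  intro nums k _ hD
  by_cases hk : 1 ≤ k
  · exact pvMain nums k hk
  · have hk0 : k ≤ 0 := by omega
    rw [pvDegenerate nums k hk0, pvAlt_degenerate nums k hk0]
    apply pvFoldlMax_nonpos
    intro x hx
    by_contra hpos
    exact hD ⟨hk0, x, hx, by omega⟩

theorem solution_changed : Claim_changed_solution := by
  unfold Claim_changed_solution; decide

theorem solution_tight : Claim_exact_solution := by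
  intro nums k _ hD
  obtain ⟨hk0, x, hx, hxpos⟩ := hD
  rw [pvDegenerate nums k hk0, pvAlt_degenerate nums k hk0]
  have h1 : nums.foldl (fun a x => max a x) 0 = nums.foldl max 0 := rfl
  have h2 := (PySem.List.le_foldl_max nums 0).2 x hx
  rw [h1]
  omega
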